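-- pv_equiv track=rewrite | github.com/goatmilkkk/goatmilkkk.github.io | docs/generate_sidebar.py | _is_list_item
-- ===== SOURCE A (Python) =====
-- def _is_list_item(line: str) -> bool:
--     stripped = line.lstrip()
--     if not stripped:
--         return False
--     if stripped.startswith(("-", "*")):
--         return True
--     # numbered list: "1.", "12)", "1)"
--     if stripped[0].isdigit():
--         for sep in (".", ")"):
--             if sep in stripped:
--                 prefix = stripped.split(sep, 1)[0]
--                 if prefix.isdigit():
--                     return True
--     return False
-- ===== SOURCE B (Python) =====
-- def _is_list_item(line: str) -> bool:
--     s = line.lstrip()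
--     if not s:
--         return False
--     if s[0] in "-*":
--         return True
--     if not s[0].isdigit():
--         return False
--     i = 1
--     while i < len(s) and s[i].isdigit():
--         i += 1
--     return i < len(s) and s[i] in ".)"
-- ===== Notes on version B (the rewrite author's own statement) =====
-- stated objective: simpler
-- what changed: Replaced A's per-separator substring search plus split-and-validate loop by a single left-to-right scan: skip the digit run and test whether the next character is a dot or a closing parenthesis.
import Mathlib
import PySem

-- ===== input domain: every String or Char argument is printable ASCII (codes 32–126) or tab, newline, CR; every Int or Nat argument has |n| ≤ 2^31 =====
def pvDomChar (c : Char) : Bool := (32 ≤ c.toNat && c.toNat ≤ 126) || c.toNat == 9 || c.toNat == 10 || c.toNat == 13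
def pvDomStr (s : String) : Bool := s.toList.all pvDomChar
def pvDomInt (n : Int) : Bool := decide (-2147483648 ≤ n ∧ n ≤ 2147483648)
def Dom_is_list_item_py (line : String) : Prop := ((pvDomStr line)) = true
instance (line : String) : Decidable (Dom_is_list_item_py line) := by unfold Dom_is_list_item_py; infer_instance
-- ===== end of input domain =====

-- B replaces A's per-separator substring search + split-and-validate loop by one left-to-right scan (objective: simpler).

-- ===== PORT A =====
def is_list_item_py (line : String) : Bool :=
  let stripped := PySem.Str.lstrip line
  if stripped == "" then false
  else if PySem.Str.startswith stripped "-" || PySem.Str.startswith stripped "*" then true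
  else if (match PySem.Str.pyGet? stripped 0 with
           | some ch => PySem.Chars.isdigit ch
           | none => false) then
    -- for sep in (".", ")"): early 'return True' ported as List.any
    ([".", ")"] : List String).any (fun sep =>
      PySem.Str.isIn sep stripped &&
      (match PySem.Str.splitMax? stripped sep 1 with
       | some parts =>
         match PySem.List.pyGet? parts 0 with
         | some pre => PySem.Str.strIsdigit pre
         | none => false
       | none => false))
  else false

-- ===== PORT B =====
-- the while loop of Source B: skip the digit run, then test the next character
def pvScanSep : List Char → Bool
  | [] => false
  | c :: rest => if PySem.Chars.isdigit c then pvScanSep rest else (c == '.' || c == ')')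

def is_list_item_py_alt (line : String) : Bool :=
  match PySem.Chars.lstrip line.toList with
  | [] => false
  | c :: rest =>
    if c == '-' || c == '*' then true
    else if PySem.Chars.isdigit c then pvScanSep rest
    else false

-- ===== PRECONDITION & SPEC =====
def Spec_is_list_item_py (line : String) (out : Bool) : Prop := out = is_list_item_py_alt line
instance (line : String) (out : Bool) : Decidable (Spec_is_list_item_py line out) := by unfold Spec_is_list_item_py; infer_instance

-- ===== CLAIM (what is proved, stated in full; the proofs are below) =====
def Claim_equal_is_list_item_py : Prop := ∀ (line : String), Dom_is_list_item_py line → Spec_is_list_item_py line (is_list_item_py line)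

-- ===== LEMMAS AND PROOFS =====

-- single-character membership test: 'sep in s' is list membership
theorem pv_isIn_singleton (a : Char) (l : List Char) :
    PySem.Chars.isIn [a] l = l.contains a := by
  by_cases h : a ∈ l
  · have hinf : [a] <:+: l := by
      obtain ⟨s, t, rfl⟩ := List.append_of_mem h
      exact ⟨s, t, by simp⟩
    simp [(PySem.Chars.isIn_iff_infix _ _).mpr hinf, h]
  · have : PySem.Chars.isIn [a] l = false := by
      rw [PySem.Chars.isIn_eq_false_iff _ _]
      intro hinf
      exact h (List.singleton_sublist.mp hinf.sublist)
    simp [this, h]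

-- splitOnMax.go with maxsplit exhausted returns the remainder as one last piece
theorem pv_go_zero (sep : Char) (fuel : Nat) (l cur : List Char) (acc : List (List Char)) :
    PySem.Chars.splitOnMax.go [sep] fuel 0 l cur acc = ((cur.reverse ++ l) :: acc).reverse := by
  cases fuel with
  | zero => simp [PySem.Chars.splitOnMax.go]
  | succ f => cases l <;> simp [PySem.Chars.splitOnMax.go]

-- splitOnMax.go with maxsplit = 1: split at the first occurrence of sep (if any)
theorem pv_go_one (sep : Char) :
    ∀ (cs : List Char) (cur : List Char) (fuel : Nat), cs.length < fuel →
    PySem.Chars.splitOnMax.go [sep] fuel 1 cs cur [] =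
      if cs.contains sep then
        [cur.reverse ++ cs.takeWhile (fun x => !(x == sep)), (cs.dropWhile (fun x => !(x == sep))).tail]
      else [cur.reverse ++ cs] := by
  intro cs
  induction cs with
  | nil =>
    intro cur fuel hf
    cases fuel with
    | zero => omega
    | succ f => simp [PySem.Chars.splitOnMax.go]
  | cons c rest ih =>
    intro cur fuel hf
    cases fuel with
    | zero => omega
    | succ f =>
      by_cases hc : c = sep
      · subst hc
        have hpre : [c].isPrefixOf (c :: rest) = true := by simp [List.isPrefixOf]
        simp only [PySem.Chars.splitOnMax.go, hpre]
        rw [pv_go_zero]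
        simp
      · have hpre : [sep].isPrefixOf (c :: rest) = false := by
          simp [List.isPrefixOf]
          exact fun h => hc h.symm
        simp only [PySem.Chars.splitOnMax.go, hpre]
        rw [ih (c :: cur) f (by simpa using Nat.lt_of_succ_lt_succ hf)]
        have hcb : (!(c == sep)) = true := by simp [hc]
        have hc' : sep ≠ c := fun h => hc h.symm
        have ht : List.takeWhile (fun x => !(x == sep)) (c :: rest)
            = c :: List.takeWhile (fun x => !(x == sep)) rest := List.takeWhile_cons_of_pos hcb
        have hdw : List.dropWhile (fun x => !(x == sep)) (c :: rest)
            = List.dropWhile (fun x => !(x == sep)) rest := List.dropWhile_cons_of_pos hcb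
        by_cases hm : sep ∈ rest <;> simp [hm, hc', ht, hdw]
      
-- a digit is neither of the two separator characters
theorem pv_digit_not_sep (c : Char) (hd : PySem.Chars.isdigit c = true) :
    (c == '.') = false ∧ (c == ')') = false := by
  constructor <;> (rw [beq_eq_false_iff_ne]; intro h; subst h; exact absurd hd (by decide))

-- the disjunction over the two separators equals the single scan of B
theorem pv_keyG : ∀ rest : List Char,
    ((rest.contains '.' && (rest.takeWhile (fun x => !(x == '.'))).all PySem.Chars.isdigit)
      || (rest.contains ')' && (rest.takeWhile (fun x => !(x == ')'))).all PySem.Chars.isdigit))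
    = pvScanSep rest := by
  intro rest
  induction rest with
  | nil => simp [pvScanSep]
  | cons c r ih =>
    by_cases hd : PySem.Chars.isdigit c = true
    · obtain ⟨hdot, hpar⟩ := pv_digit_not_sep c hd
      rw [show pvScanSep (c :: r) = pvScanSep r by simp [pvScanSep, hd]]
      rw [← ih]
      have hbd : (!(c == '.')) = true := by simp [hdot]
      have hbp : (!(c == ')')) = true := by simp [hpar]
      have n1 : ('.' : Char) ≠ c := Ne.symm (beq_eq_false_iff_ne.mp hdot)
      have n2 : (')' : Char) ≠ c := Ne.symm (beq_eq_false_iff_ne.mp hpar)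
      have ht1 : List.takeWhile (fun x => !(x == '.')) (c :: r)
          = c :: List.takeWhile (fun x => !(x == '.')) r := List.takeWhile_cons_of_pos hbd
      have ht2 : List.takeWhile (fun x => !(x == ')')) (c :: r)
          = c :: List.takeWhile (fun x => !(x == ')')) r := List.takeWhile_cons_of_pos hbp
      simp [ht1, ht2, n1, n2, hd]
    · have hd' : PySem.Chars.isdigit c = false := by simpa using hd
      by_cases h1 : c = '.'
      · subst h1
        simp [pvScanSep, hd']
      · by_cases h2 : c = ')'
        · subst h2
          simp [pvScanSep, hd']
        · have hbd : (!(c == '.')) = true := by simp [h1]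
          have hbp : (!(c == ')')) = true := by simp [h2]
          have ht1 : List.takeWhile (fun x => !(x == '.')) (c :: r)
              = c :: List.takeWhile (fun x => !(x == '.')) r := List.takeWhile_cons_of_pos hbd
          have ht2 : List.takeWhile (fun x => !(x == ')')) (c :: r)
              = c :: List.takeWhile (fun x => !(x == ')')) r := List.takeWhile_cons_of_pos hbp
          simp [pvScanSep, hd', ht1, ht2, h1, h2, Ne.symm h1, Ne.symm h2]

-- ===== VERDICT (by name: the statement is the Claim_ definition above) =====
theorem is_list_item_py_spec : Claim_equal_is_list_item_py := by
  intro line _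
  unfold Spec_is_list_item_py is_list_item_py is_list_item_py_alt
  cases hcs : PySem.Chars.lstrip line.toList with
  | nil =>
    have hmt : PySem.Str.lstrip line = "" := String.toList_eq_nil_iff.mp (by simp [hcs])
    simp [hmt]
  | cons c rest =>
    simp [hcs]
    have hne : PySem.Str.lstrip line ≠ "" := by
      intro h
      have h2 : (PySem.Str.lstrip line).toList = c :: rest := by simp [hcs]
      rw [h] at h2
      simp at h2
    have hsw : ∀ p : Char, PySem.Chars.startswith (c :: rest) [p] = decide (c = p) := by
      intro p
      by_cases h : c = p
      · subst h; simp [PySem.Chars.startswith, List.isPrefixOf]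
      · have h2 : ¬ p = c := fun hq => h hq.symm
        simp [PySem.Chars.startswith, List.isPrefixOf, h, h2]
    by_cases hd : PySem.Chars.isdigit c = true
    · obtain ⟨hdot, hpar⟩ := pv_digit_not_sep c hd
      have n1 : c ≠ '.' := beq_eq_false_iff_ne.mp hdot
      have n2 : c ≠ ')' := beq_eq_false_iff_ne.mp hpar
      have hsd : PySem.Str.splitMax? (PySem.Str.lstrip line) "." 1
          = some ((PySem.Chars.splitOnMax (c :: rest) ['.'] 1).map String.ofList) := by
        simp [PySem.Str.splitMax?, PySem.Chars.splitMax?, hcs]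
      have hsp : PySem.Str.splitMax? (PySem.Str.lstrip line) ")" 1
          = some ((PySem.Chars.splitOnMax (c :: rest) [')'] 1).map String.ofList) := by
        simp [PySem.Str.splitMax?, PySem.Chars.splitMax?, hcs]
      have hval : ∀ sep : Char, PySem.Chars.splitOnMax (c :: rest) [sep] 1
          = if (c :: rest).contains sep then
              [(c :: rest).takeWhile (fun x => !(x == sep)),
                ((c :: rest).dropWhile (fun x => !(x == sep))).tail]
            else [c :: rest] := by
        intro sep
        unfold PySem.Chars.splitOnMax
        rw [if_neg (by norm_num), (show ((1 : Int)).toNat = 1 from rfl),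
          pv_go_one sep _ [] _ (by omega)]
        simp
      rw [hsd, hsp, hval '.', hval ')']
      rw [← pv_keyG rest]
      have m1 : ('.' : Char) ≠ c := fun h => n1 h.symm
      have m2 : (')' : Char) ≠ c := fun h => n2 h.symm
      by_cases r1 : '.' ∈ rest <;> by_cases r2 : ')' ∈ rest <;>
        simp [hne, hsw, hd, n1, n2, m1, m2, r1, r2, pv_isIn_singleton,
          PySem.List.pyGet?, PySem.List.pyIdx?, PySem.Chars.strIsdigit]
    · have hd' : PySem.Chars.isdigit c = false := by simpa using hd
      simp [hne, hsw, hd', PySem.List.pyGet?, PySem.List.pyIdx?]
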